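-- pv_equiv track=rewrite | github.com/RajRudra06/Webshield-IDS-Backend | app/utils/helperScripts/typoSquattingFunction.py | generate_all_typosquatting_patterns
-- ===== SOURCE A (Python) =====
-- def generate_all_typosquatting_patterns(brand):
--
--     patterns = set()
--
--     substitutions = {
--         'o': ['0'],
--         'i': ['1', '!', '|'],
--         'l': ['1', '|'],
--         'e': ['3'],
--         'a': ['@', '4'],
--         's': ['$', '5'],
--         'g': ['9'],
--         't': ['7'],
--         'b': ['8']
--     }
--
--     for i, char in enumerate(brand):
--         if char in substitutions:
--             for replacement in substitutions[char]:
--                 variant = brand[:i] + replacement + brand[i+1:]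
--                 patterns.add(variant)
--
--     for i, char1 in enumerate(brand):
--         if char1 in substitutions:
--             for j, char2 in enumerate(brand[i+1:], start=i+1):
--                 if char2 in substitutions:
--                     for rep1 in substitutions[char1]:
--                         for rep2 in substitutions[char2]:
--                             variant = list(brand)
--                             variant[i] = rep1
--                             variant[j] = rep2
--                             patterns.add(''.join(variant))
--
--     if len(brand) > 4:
--         for i in range(len(brand)):
--             variant = brand[:i] + brand[i+1:]
--             patterns.add(variant)
--
--     for i in range(len(brand)):
--         variant = brand[:i] + brand[i] + brand[i:]
--         patterns.add(variant)
--
--     for i in range(len(brand) - 1):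
--         chars = list(brand)
--         chars[i], chars[i+1] = chars[i+1], chars[i]
--         patterns.add(''.join(chars))
--
--     return patterns
-- ===== SOURCE B (Python) =====
-- SUBS = {
--     'o': ['0'],
--     'i': ['1', '!', '|'],
--     'l': ['1', '|'],
--     'e': ['3'],
--     'a': ['@', '4'],
--     's': ['$', '5'],
--     'g': ['9'],
--     't': ['7'],
--     'b': ['8'],
-- }
--
--
-- def _singles(brand):
--     """All variants of brand replacing one substitutable char (prefix walk)."""
--     out = []
--     pfx, rest = "", brand
--     while rest:
--         c, tail = rest[0], rest[1:]
--         out += [pfx + r + tail for r in SUBS.get(c, [])]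
--         pfx, rest = pfx + c, tail
--     return out
--
--
-- def _pairs_after(pre, opts1, rest):
--     """Variants pre+r1+mid+r2+tail for r1 in opts1 and each substitutable char of rest."""
--     out = []
--     mid = ""
--     while rest:
--         c2, tail = rest[0], rest[1:]
--         out += [pre + r1 + mid + r2 + tail
--                 for r1 in opts1 for r2 in SUBS.get(c2, [])]
--         mid, rest = mid + c2, tail
--     return out
--
--
-- def _doubles(brand):
--     """All variants of brand replacing two substitutable chars."""
--     out = []
--     pfx, rest = "", brand
--     while rest:
--         c, tail = rest[0], rest[1:]
--         opts = SUBS.get(c, [])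
--         out += _pairs_after(pfx, opts, tail) if opts else []
--         pfx, rest = pfx + c, tail
--     return out
--
--
-- def _deletions(brand):
--     out = []
--     pfx, rest = "", brand
--     while rest:
--         c, tail = rest[0], rest[1:]
--         out.append(pfx + tail)
--         pfx, rest = pfx + c, tail
--     return out
--
--
-- def _duplications(brand):
--     out = []
--     pfx, rest = "", brand
--     while rest:
--         c, tail = rest[0], rest[1:]
--         out.append(pfx + c + c + tail)
--         pfx, rest = pfx + c, tail
--     return out
--
--
-- def _swaps(brand):
--     out = []
--     pfx, rest = "", brand
--     while len(rest) >= 2: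
--         c, d = rest[0], rest[1]
--         out.append(pfx + d + c + rest[2:])
--         pfx, rest = pfx + c, rest[1:]
--     return out
--
--
-- def generate_all_typosquatting_patterns(brand):
--     variants = _singles(brand) + _doubles(brand)
--     if len(brand) > 4:
--         variants += _deletions(brand)
--     variants += _duplications(brand) + _swaps(brand)
--     return set(variants)
-- ===== Notes on version B (the rewrite author's own statement) =====
-- stated objective: alternative
-- what changed: B replaces A's five imperative indexed passes that mutate a set (enumerate/range loops with slicing, list-cell assignment and per-variant set.add) by pure structural recursion: six recursive generators walk the string with a growing prefix accumulator and return plain lists of variants (the double-substitution generator recursing a second time over the tail), which are concatenated and deduplicated once by a single set() at the end.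
import Mathlib
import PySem

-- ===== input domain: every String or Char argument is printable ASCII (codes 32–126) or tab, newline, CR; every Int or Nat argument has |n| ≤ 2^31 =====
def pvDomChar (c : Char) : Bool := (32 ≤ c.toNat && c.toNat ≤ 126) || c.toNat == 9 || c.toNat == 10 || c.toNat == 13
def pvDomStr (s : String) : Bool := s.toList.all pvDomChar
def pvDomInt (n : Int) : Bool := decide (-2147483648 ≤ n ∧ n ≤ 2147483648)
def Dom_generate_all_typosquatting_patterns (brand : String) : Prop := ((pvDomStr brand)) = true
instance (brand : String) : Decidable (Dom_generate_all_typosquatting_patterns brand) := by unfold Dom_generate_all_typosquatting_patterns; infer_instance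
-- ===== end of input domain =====

-- B rebuilds the variants by pure structural recursion (prefix accumulator, no index loops,
-- no slicing) and deduplicates once at the end, instead of A's five indexed passes that
-- mutate a set; same result set.

-- the 'substitutions' dict of both Pythons: 'c in substitutions' = (pvSubs c).isSome,
-- 'substitutions[c]' / 'SUBS.get(c, [])' = its value (1-char replacement strings as Chars)
def pvSubs (c : Char) : Option (List Char) :=
  if c = 'o' then some ['0']
  else if c = 'i' then some ['1', '!', '|']
  else if c = 'l' then some ['1', '|']
  else if c = 'e' then some ['3']
  else if c = 'a' then some ['@', '4']
  else if c = 's' then some ['$', '5']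
  else if c = 'g' then some ['9']
  else if c = 't' then some ['7']
  else if c = 'b' then some ['8']
  else none

-- ===== PORT A =====
-- enumerate(xs, start=k): indices are the Nats k, k+1, … (Python's are nonnegative here) — exact
def pvEnumFrom : Nat → List Char → List (Nat × Char)
  | _, [] => []
  | k, c :: cs => (k, c) :: pvEnumFrom (k + 1) cs

-- A, pass 1: scan brand, branch on membership, substitute one position
def pvSingleA (cs : List Char) (s : PySem.Set String) : PySem.Set String :=
  (pvEnumFrom 0 cs).foldl (fun s ic =>
    match pvSubs ic.2 with
    | some reps => reps.foldl (fun s r =>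
        PySem.Set.add s (String.ofList (cs.take ic.1 ++ r :: cs.drop (ic.1 + 1)))) s
    | none => s) s

-- A, pass 2: rescan brand[i+1:] (enumerate with start=i+1) for the second position
def pvDoubleA (cs : List Char) (s : PySem.Set String) : PySem.Set String :=
  (pvEnumFrom 0 cs).foldl (fun s ic =>
    match pvSubs ic.2 with
    | some reps1 =>
      (pvEnumFrom (ic.1 + 1) (cs.drop (ic.1 + 1))).foldl (fun s jc =>
        match pvSubs jc.2 with
        | some reps2 => reps1.foldl (fun s r1 => reps2.foldl (fun s r2 =>
            PySem.Set.add s (String.ofList ((cs.set ic.1 r1).set jc.1 r2))) s) s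
        | none => s) s
    | none => s) s

-- A, pass 3: deletion, guarded by len > 4
def pvDelete (cs : List Char) (s : PySem.Set String) : PySem.Set String :=
  if cs.length > 4 then
    (List.range cs.length).foldl (fun s i =>
      PySem.Set.add s (String.ofList (cs.take i ++ cs.drop (i + 1)))) s
  else s

-- A, pass 4: duplication-insertion brand[:i] + brand[i] + brand[i:]
def pvInsert (cs : List Char) (s : PySem.Set String) : PySem.Set String :=
  (List.range cs.length).foldl (fun s i =>
    PySem.Set.add s (String.ofList (cs.take i ++ cs.getD i ' ' :: cs.drop i))) s

-- A, pass 5: swap adjacent chars via list(brand) and two assignments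
def pvSwapA (cs : List Char) (s : PySem.Set String) : PySem.Set String :=
  (List.range (cs.length - 1)).foldl (fun s i =>
    PySem.Set.add s (String.ofList ((cs.set i (cs.getD (i + 1) ' ')).set (i + 1) (cs.getD i ' ')))) s

def generate_all_typosquatting_patterns (brand : String) : List String :=
  let cs := brand.toList
  pvSwapA cs (pvInsert cs (pvDelete cs (pvDoubleA cs (pvSingleA cs PySem.Set.empty))))

-- ===== PORT B =====
-- _singles: while-loop over the string, prefix pfx and list out as loop state
def altSingles (pfx : List Char) (out : List String) : List Char → List String
  | [] => out
  | c :: tail =>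
    altSingles (pfx ++ [c])
      (out ++ ((pvSubs c).getD []).map (fun r => String.ofList (pfx ++ r :: tail))) tail

-- _pairs_after: while-loop, mid and out as loop state
def altPairsAfter (pre : List Char) (opts1 : List Char) (mid : List Char)
    (out : List String) : List Char → List String
  | [] => out
  | c2 :: tail =>
    altPairsAfter pre opts1 (mid ++ [c2])
      (out ++ opts1.flatMap (fun r1 => ((pvSubs c2).getD []).map (fun r2 =>
        String.ofList (pre ++ r1 :: mid ++ r2 :: tail)))) tail

-- _doubles: while-loop calling _pairs_after on each substitutable head
def altDoubles (pfx : List Char) (out : List String) : List Char → List String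
  | [] => out
  | c :: tail =>
    altDoubles (pfx ++ [c])
      (out ++ (let opts := (pvSubs c).getD []
               if opts = [] then [] else altPairsAfter pfx opts [] [] tail)) tail

def altDels (pfx : List Char) (out : List String) : List Char → List String
  | [] => out
  | c :: tail => altDels (pfx ++ [c]) (out ++ [String.ofList (pfx ++ tail)]) tail

def altDups (pfx : List Char) (out : List String) : List Char → List String
  | [] => out
  | c :: tail => altDups (pfx ++ [c]) (out ++ [String.ofList (pfx ++ c :: c :: tail)]) tail

def altSwaps (pfx : List Char) (out : List String) : List Char → List String
  | [] => out
  | [_] => out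
  | c :: d :: tail =>
    altSwaps (pfx ++ [c]) (out ++ [String.ofList (pfx ++ d :: c :: tail)]) (d :: tail)

def generate_all_typosquatting_patterns_alt (brand : String) : List String :=
  let cs := brand.toList
  let v1 := altSingles [] [] cs ++ altDoubles [] [] cs
  let v2 := if cs.length > 4 then v1 ++ altDels [] [] cs else v1
  let v3 := v2 ++ (altDups [] [] cs ++ altSwaps [] [] cs)
  PySem.Set.ofList v3

-- ===== PRECONDITION & SPEC =====
def Spec_generate_all_typosquatting_patterns (brand : String) (out : List String) : Prop := out = generate_all_typosquatting_patterns_alt brand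
instance (brand : String) (out : List String) : Decidable (Spec_generate_all_typosquatting_patterns brand out) := by unfold Spec_generate_all_typosquatting_patterns; infer_instance

-- ===== CLAIM =====
def Claim_equal_generate_all_typosquatting_patterns : Prop := ∀ (brand : String), Dom_generate_all_typosquatting_patterns brand → Spec_generate_all_typosquatting_patterns brand (generate_all_typosquatting_patterns brand)

-- ===== LEMMAS AND PROOFS =====

-- the variant lists each while-loop produces, written as plain structural recursions
-- _singles(prefix, rest): one substitutable char of rest replaced
def sSingles (pfx : List Char) : List Char → List String
  | [] => []
  | c :: tail =>
    ((pvSubs c).getD []).map (fun r => String.ofList (pfx ++ r :: tail))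
      ++ sSingles (pfx ++ [c]) tail

-- _pairs_after(pre, opts1, mid, rest): pre + r1 + mid + r2 + tail'
def sPairsAfter (pre : List Char) (opts1 : List Char) (mid : List Char) :
    List Char → List String
  | [] => []
  | c2 :: tail =>
    opts1.flatMap (fun r1 => ((pvSubs c2).getD []).map (fun r2 =>
      String.ofList (pre ++ r1 :: mid ++ r2 :: tail)))
      ++ sPairsAfter pre opts1 (mid ++ [c2]) tail

-- _doubles(prefix, rest): two substitutable chars of rest replaced
def sDoubles (pfx : List Char) : List Char → List String
  | [] => []
  | c :: tail =>
    (let opts := (pvSubs c).getD []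
     if opts = [] then [] else sPairsAfter pfx opts [] tail)
      ++ sDoubles (pfx ++ [c]) tail

def sDels (pfx : List Char) : List Char → List String
  | [] => []
  | c :: tail => String.ofList (pfx ++ tail) :: sDels (pfx ++ [c]) tail

def sDups (pfx : List Char) : List Char → List String
  | [] => []
  | c :: tail => String.ofList (pfx ++ c :: c :: tail) :: sDups (pfx ++ [c]) tail

def sSwaps (pfx : List Char) : List Char → List String
  | [] => []
  | [_] => []
  | c :: d :: tail => String.ofList (pfx ++ d :: c :: tail) :: sSwaps (pfx ++ [c]) (d :: tail)

-- each loop's accumulator threads through: altX pfx out rest = out ++ sX pfx rest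
lemma altSingles_eq : ∀ (rest pfx : List Char) (out : List String),
    altSingles pfx out rest = out ++ sSingles pfx rest := by
  intro rest
  induction rest with
  | nil => intro pfx out; simp [altSingles, sSingles]
  | cons c tail ih => intro pfx out; simp [altSingles, sSingles, ih]

lemma altPairsAfter_eq (pre opts1 : List Char) : ∀ (rest mid : List Char) (out : List String),
    altPairsAfter pre opts1 mid out rest = out ++ sPairsAfter pre opts1 mid rest := by
  intro rest
  induction rest with
  | nil => intro mid out; simp [altPairsAfter, sPairsAfter]
  | cons c2 tail ih => intro mid out; simp [altPairsAfter, sPairsAfter, ih]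

lemma altDoubles_eq : ∀ (rest pfx : List Char) (out : List String),
    altDoubles pfx out rest = out ++ sDoubles pfx rest := by
  intro rest
  induction rest with
  | nil => intro pfx out; simp [altDoubles, sDoubles]
  | cons c tail ih =>
    intro pfx out
    simp only [altDoubles, sDoubles, ih, altPairsAfter_eq]
    by_cases h : (pvSubs c).getD [] = [] <;> simp [h]

lemma altDels_eq : ∀ (rest pfx : List Char) (out : List String),
    altDels pfx out rest = out ++ sDels pfx rest := by
  intro rest
  induction rest with
  | nil => intro pfx out; simp [altDels, sDels]
  | cons c tail ih => intro pfx out; simp [altDels, sDels, ih]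

lemma altDups_eq : ∀ (rest pfx : List Char) (out : List String),
    altDups pfx out rest = out ++ sDups pfx rest := by
  intro rest
  induction rest with
  | nil => intro pfx out; simp [altDups, sDups]
  | cons c tail ih => intro pfx out; simp [altDups, sDups, ih]

lemma altSwaps_eq : ∀ (rest pfx : List Char) (out : List String),
    altSwaps pfx out rest = out ++ sSwaps pfx rest := by
  intro rest
  induction rest with
  | nil => intro pfx out; simp [altSwaps, sSwaps]
  | cons c tail ih =>
    intro pfx out
    cases tail with
    | nil => simp [altSwaps, sSwaps]
    | cons d tail2 => simp [altSwaps, sSwaps, ih]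

-- setting the cell just past a pfx
lemma pvSetLen {α : Type} : ∀ (L : List α) (x : α) (rest : List α) (v : α),
    (L ++ x :: rest).set L.length v = L ++ v :: rest := by
  intro L
  induction L with
  | nil => intro x rest v; rfl
  | cons a t ih => intro x rest v; simp [ih]

lemma pvGetDLen : ∀ (L : List Char) (x : Char) (rest : List Char),
    (L ++ x :: rest).getD L.length ' ' = x := by
  intro L
  induction L with
  | nil => intro x rest; rfl
  | cons a t ih => intro x rest; simp only [List.cons_append, List.length_cons, List.getD_cons_succ]; exact ih x rest

lemma pvTakeLen {α : Type} (L R : List α) : (L ++ R).take L.length = L := by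
  simp

lemma pvDropLen1 {α : Type} (L : List α) (x : α) (R : List α) :
    (L ++ x :: R).drop (L.length + 1) = R := by
  have : L ++ x :: R = (L ++ [x]) ++ R := by simp
  rw [this]
  have h : L.length + 1 = (L ++ [x]).length := by simp
  rw [h, List.drop_left]

-- folding Set.add over a flatMap = the nested fold
lemma pvFoldlFlatMap {α β : Type} [BEq β] (g : α → List β) :
    ∀ (l : List α) (s : PySem.Set β),
    (l.flatMap g).foldl PySem.Set.add s = l.foldl (fun s x => (g x).foldl PySem.Set.add s) s := by
  intro l
  induction l with
  | nil => intro s; rfl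
  | cons a t ih => intro s; simp [List.flatMap_cons, List.foldl_append, ih]

lemma pvSubs_ne_nil (c : Char) (reps : List Char) (h : pvSubs c = some reps) : reps ≠ [] := by
  unfold pvSubs at h
  split_ifs at h <;> simp [← Option.some_inj.mp h]

-- pass 1: A's enumerate fold = fold of Set.add over B's recursive list
lemma pvSingles_eq (cs : List Char) : ∀ (d pre : List Char), cs = pre ++ d →
    ∀ (s : PySem.Set String),
    (pvEnumFrom pre.length d).foldl (fun s ic =>
      match pvSubs ic.2 with
      | some reps => reps.foldl (fun s r =>
          PySem.Set.add s (String.ofList (cs.take ic.1 ++ r :: cs.drop (ic.1 + 1)))) s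
      | none => s) s
    = (sSingles pre d).foldl PySem.Set.add s := by
  intro d
  induction d with
  | nil => intro pre h s; rfl
  | cons c tail ih =>
    intro pre h s
    have hcs : cs = (pre ++ [c]) ++ tail := by simp [h]
    have htake : cs.take pre.length = pre := by rw [h]; exact pvTakeLen pre _
    have hdrop : cs.drop (pre.length + 1) = tail := by rw [h]; exact pvDropLen1 pre c tail
    cases hc : pvSubs c with
    | none =>
      simp only [pvEnumFrom, List.foldl_cons, hc, sSingles, Option.getD_none, List.map_nil,
        List.nil_append]
      have : (pre ++ [c]).length = pre.length + 1 := by simp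
      rw [← this]
      exact ih (pre ++ [c]) hcs s
    | some reps =>
      simp only [pvEnumFrom, List.foldl_cons, hc, sSingles, Option.getD_some,
        List.foldl_append]
      rw [htake, hdrop, ← List.foldl_map]
      have : (pre ++ [c]).length = pre.length + 1 := by simp
      rw [← this]
      exact ih (pre ++ [c]) hcs _

-- pass 2 inner: A's rescan of brand[i+1:] = B's _pairs_after recursion
lemma pvPairs_eq (cs : List Char) (pre : List Char) (c : Char) (opts : List Char) :
    ∀ (rest mid : List Char), cs = pre ++ c :: (mid ++ rest) →
    ∀ (s : PySem.Set String),
    (pvEnumFrom (pre.length + 1 + mid.length) rest).foldl (fun s jc =>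
      match pvSubs jc.2 with
      | some reps2 => opts.foldl (fun s r1 => reps2.foldl (fun s r2 =>
          PySem.Set.add s (String.ofList ((cs.set pre.length r1).set jc.1 r2))) s) s
      | none => s) s
    = (sPairsAfter pre opts mid rest).foldl PySem.Set.add s := by
  intro rest
  induction rest with
  | nil => intro mid h s; rfl
  | cons c2 tail ih =>
    intro mid h s
    have hcs' : cs = pre ++ c :: ((mid ++ [c2]) ++ tail) := by simp [h]
    have hval : ∀ r1 r2, (cs.set pre.length r1).set (pre.length + 1 + mid.length) r2
        = pre ++ r1 :: mid ++ r2 :: tail := by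
      intro r1 r2
      have h1 : cs.set pre.length r1 = pre ++ r1 :: (mid ++ c2 :: tail) := by
        rw [h]; exact pvSetLen pre c _ r1
      have h2 : pre ++ r1 :: (mid ++ c2 :: tail) = (pre ++ r1 :: mid) ++ c2 :: tail := by simp
      have h3 : pre.length + 1 + mid.length = (pre ++ r1 :: mid).length := by
        simp only [List.length_append, List.length_cons]; omega
      rw [h1, h2, h3, pvSetLen]
    cases hc2 : pvSubs c2 with
    | none =>
      simp only [pvEnumFrom, List.foldl_cons, hc2, sPairsAfter, Option.getD_none,
        List.map_nil]
      have hflat : (opts.flatMap (fun _ => ([] : List String))) = [] := by simp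
      rw [hflat, List.nil_append]
      have hk : pre.length + 1 + mid.length + 1 = pre.length + 1 + (mid ++ [c2]).length := by
        simp only [List.length_append, List.length_cons, List.length_nil]; omega
      rw [hk]
      exact ih (mid ++ [c2]) hcs' s
    | some reps2 =>
      simp only [pvEnumFrom, List.foldl_cons, hc2, sPairsAfter, Option.getD_some,
        List.foldl_append]
      rw [pvFoldlFlatMap]
      have hinner : ∀ s,
          opts.foldl (fun s r1 => reps2.foldl (fun s r2 =>
            PySem.Set.add s (String.ofList ((cs.set pre.length r1).set (pre.length + 1 + mid.length) r2))) s) s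
          = opts.foldl (fun s r1 =>
              (reps2.map (fun r2 => String.ofList (pre ++ r1 :: mid ++ r2 :: tail))).foldl
                PySem.Set.add s) s := by
        intro s
        apply PySem.List.foldl_congr_mem
        intro acc r1 _
        rw [← List.foldl_map]
        have hmap : (reps2.map fun r2 =>
            String.ofList ((cs.set pre.length r1).set (pre.length + 1 + mid.length) r2))
            = reps2.map fun r2 => String.ofList (pre ++ r1 :: mid ++ r2 :: tail) := by
          simp [hval]
        rw [hmap]
      rw [hinner]
      have hk : pre.length + 1 + mid.length + 1 = pre.length + 1 + (mid ++ [c2]).length := by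
        simp only [List.length_append, List.length_cons, List.length_nil]; omega
      rw [hk]
      exact ih (mid ++ [c2]) hcs' _

-- pass 2 outer
lemma pvDoubles_eq (cs : List Char) : ∀ (d pre : List Char), cs = pre ++ d →
    ∀ (s : PySem.Set String),
    (pvEnumFrom pre.length d).foldl (fun s ic =>
      match pvSubs ic.2 with
      | some reps1 =>
        (pvEnumFrom (ic.1 + 1) (cs.drop (ic.1 + 1))).foldl (fun s jc =>
          match pvSubs jc.2 with
          | some reps2 => reps1.foldl (fun s r1 => reps2.foldl (fun s r2 =>
              PySem.Set.add s (String.ofList ((cs.set ic.1 r1).set jc.1 r2))) s) s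
          | none => s) s
      | none => s) s
    = (sDoubles pre d).foldl PySem.Set.add s := by
  intro d
  induction d with
  | nil => intro pre h s; rfl
  | cons c tail ih =>
    intro pre h s
    have hcs : cs = (pre ++ [c]) ++ tail := by simp [h]
    have hlen : (pre ++ [c]).length = pre.length + 1 := by simp
    cases hc : pvSubs c with
    | none =>
      simp only [pvEnumFrom, List.foldl_cons, hc, sDoubles, Option.getD_none]
      rw [← hlen]
      exact ih (pre ++ [c]) hcs s
    | some reps1 =>
      have hne : reps1 ≠ [] := pvSubs_ne_nil c reps1 hc
      simp only [pvEnumFrom, List.foldl_cons, hc, sDoubles, Option.getD_some,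
        if_neg hne, List.foldl_append]
      have hdrop : cs.drop (pre.length + 1) = tail := by rw [h]; exact pvDropLen1 pre c tail
      rw [hdrop]
      have hmid : cs = pre ++ c :: (([] : List Char) ++ tail) := by simpa using h
      have h0 : pre.length + 1 = pre.length + 1 + ([] : List Char).length := by simp
      rw [h0, pvPairs_eq cs pre c reps1 tail [] hmid s, ← hlen]
      exact ih (pre ++ [c]) hcs _

-- pass 3 body (the range loop, without the length guard)
lemma pvDels_eq (cs : List Char) : ∀ (d pre : List Char), cs = pre ++ d →
    ∀ (s : PySem.Set String),
    (List.range' pre.length d.length).foldl (fun s i =>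
      PySem.Set.add s (String.ofList (cs.take i ++ cs.drop (i + 1)))) s
    = (sDels pre d).foldl PySem.Set.add s := by
  intro d
  induction d with
  | nil => intro pre h s; rfl
  | cons c tail ih =>
    intro pre h s
    have hcs : cs = (pre ++ [c]) ++ tail := by simp [h]
    have hlen : (pre ++ [c]).length = pre.length + 1 := by simp
    simp only [List.length_cons, List.range'_succ, List.foldl_cons, sDels]
    rw [show cs.take pre.length = pre by rw [h]; exact pvTakeLen pre _,
        show cs.drop (pre.length + 1) = tail by rw [h]; exact pvDropLen1 pre c tail, ← hlen]
    exact ih (pre ++ [c]) hcs _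

-- pass 4
lemma pvDups_eq (cs : List Char) : ∀ (d pre : List Char), cs = pre ++ d →
    ∀ (s : PySem.Set String),
    (List.range' pre.length d.length).foldl (fun s i =>
      PySem.Set.add s (String.ofList (cs.take i ++ cs.getD i ' ' :: cs.drop i))) s
    = (sDups pre d).foldl PySem.Set.add s := by
  intro d
  induction d with
  | nil => intro pre h s; rfl
  | cons c tail ih =>
    intro pre h s
    have hcs : cs = (pre ++ [c]) ++ tail := by simp [h]
    have hlen : (pre ++ [c]).length = pre.length + 1 := by simp
    simp only [List.length_cons, List.range'_succ, List.foldl_cons, sDups]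
    rw [show cs.take pre.length = pre by rw [h]; exact pvTakeLen pre _,
        show cs.getD pre.length ' ' = c by rw [h]; exact pvGetDLen pre c tail,
        show cs.drop pre.length = c :: tail by rw [h]; exact List.drop_left, ← hlen]
    exact ih (pre ++ [c]) hcs _

-- pass 5
lemma pvSwaps_eq (cs : List Char) : ∀ (d pre : List Char), cs = pre ++ d →
    ∀ (s : PySem.Set String),
    (List.range' pre.length (d.length - 1)).foldl (fun s i =>
      PySem.Set.add s (String.ofList ((cs.set i (cs.getD (i + 1) ' ')).set (i + 1) (cs.getD i ' ')))) s
    = (sSwaps pre d).foldl PySem.Set.add s := by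
  intro d
  induction d with
  | nil => intro pre h s; rfl
  | cons c tail ih =>
    intro pre h s
    cases tail with
    | nil => rfl
    | cons c2 tail2 =>
      have hcs : cs = (pre ++ [c]) ++ c2 :: tail2 := by simp [h]
      have hlen : (pre ++ [c]).length = pre.length + 1 := by simp
      have hget1 : cs.getD (pre.length + 1) ' ' = c2 := by
        rw [hcs, ← hlen]; exact pvGetDLen (pre ++ [c]) c2 tail2
      have hget0 : cs.getD pre.length ' ' = c := by
        rw [h]; exact pvGetDLen pre c _
      have hset : (cs.set pre.length c2).set (pre.length + 1) c = pre ++ c2 :: c :: tail2 := by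
        have h1 : cs.set pre.length c2 = pre ++ c2 :: c2 :: tail2 := by
          rw [h]; exact pvSetLen pre c _ c2
        have h2 : pre ++ c2 :: c2 :: tail2 = (pre ++ [c2]) ++ c2 :: tail2 := by simp
        have h3 : pre.length + 1 = (pre ++ [c2]).length := by simp
        rw [h1, h2, h3, pvSetLen]
        simp
      simp only [List.length_cons, Nat.add_sub_cancel, List.range'_succ, List.foldl_cons,
        sSwaps]
      rw [hget1, hget0, hset, ← hlen]
      have : (c2 :: tail2).length - 1 = tail2.length := by simp
      rw [← this]
      exact ih (pre ++ [c]) hcs _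

-- per-pass corollaries at pre = []
lemma pvSingleA_eq (cs : List Char) (s : PySem.Set String) :
    pvSingleA cs s = (sSingles [] cs).foldl PySem.Set.add s := by
  unfold pvSingleA
  exact pvSingles_eq cs cs [] rfl s

lemma pvDoubleA_eq (cs : List Char) (s : PySem.Set String) :
    pvDoubleA cs s = (sDoubles [] cs).foldl PySem.Set.add s := by
  unfold pvDoubleA
  exact pvDoubles_eq cs cs [] rfl s

lemma pvDelete_eq (cs : List Char) (s : PySem.Set String) :
    pvDelete cs s = if cs.length > 4 then (sDels [] cs).foldl PySem.Set.add s else s := by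
  unfold pvDelete
  split_ifs with hlen
  · rw [List.range_eq_range']
    exact pvDels_eq cs cs [] rfl s
  · rfl

lemma pvInsert_eq (cs : List Char) (s : PySem.Set String) :
    pvInsert cs s = (sDups [] cs).foldl PySem.Set.add s := by
  unfold pvInsert
  rw [List.range_eq_range']
  exact pvDups_eq cs cs [] rfl s

lemma pvSwapA_eq (cs : List Char) (s : PySem.Set String) :
    pvSwapA cs s = (sSwaps [] cs).foldl PySem.Set.add s := by
  unfold pvSwapA
  rw [List.range_eq_range']
  exact pvSwaps_eq cs cs [] rfl s

-- ===== VERDICT =====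
theorem generate_all_typosquatting_patterns_spec : Claim_equal_generate_all_typosquatting_patterns := by
  intro brand _
  unfold Spec_generate_all_typosquatting_patterns
  show pvSwapA brand.toList
      (pvInsert brand.toList (pvDelete brand.toList
        (pvDoubleA brand.toList (pvSingleA brand.toList PySem.Set.empty))))
    = generate_all_typosquatting_patterns_alt brand
  unfold generate_all_typosquatting_patterns_alt
  simp only [altSingles_eq, altDoubles_eq, altDels_eq, altDups_eq, altSwaps_eq,
    List.nil_append]
  rw [pvSingleA_eq, pvDoubleA_eq, pvDelete_eq, pvInsert_eq, pvSwapA_eq,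
    PySem.Set.ofList_eq_foldl]
  simp only [List.foldl_append]
  split_ifs with h
  · simp [List.foldl_append]
  · simp [List.foldl_append]
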